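-- pv_equiv track=rewrite | github.com/ajolasore/Python-Programming-Projects---Starter-Packs | Functions/unfinished-business.py | common_sequence
-- ===== SOURCE A (Python) =====
-- def forward_sequence(word_sequence):
--     words = word_sequence.split(", ")
--     forward = ''.join(word.lower() for word in words)
--     return forward
--
-- def backward_sequence(word_sequence):
--     forward = forward_sequence(word_sequence)
--     backward = forward[::-1]
--     return backward
--
-- def common_sequence(word_sequence):
--     forward = forward_sequence(word_sequence)
--     backward = backward_sequence(word_sequence)
--
--     for i in range(len(forward)):
--         test1, test2 = forward[i:], backward[:len(forward) - i]
--         if test1 == test2: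
--             return test1
--     return None
-- ===== SOURCE B (Python) =====
-- def common_sequence(word_sequence):
--     s = "".join(w.lower() for w in word_sequence.split(", "))
--     if not s:
--         return None
--     # KMP failure function on t = reverse(s) + NUL + s: the final border length k
--     # is the length of the longest palindromic suffix of s.
--     t = s[::-1] + "\x00" + s
--     f = [0] * len(t)
--     k = 0
--     for i in range(1, len(t)):
--         while k and t[i] != t[k]:
--             k = f[k - 1]
--         if t[i] == t[k]:
--             k += 1
--         f[i] = k
--     return s[len(s) - k:]
-- ===== Notes on version B (the rewrite author's own statement) =====
-- stated objective: faster
-- what changed: B replaces A's quadratic scan (which compares a suffix slice against a reversed-prefix slice for every start index) by a single KMP failure-function pass over reverse(s) + NUL + s, whose final border length is exactly the length of the longest palindromic suffix.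
import Mathlib
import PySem

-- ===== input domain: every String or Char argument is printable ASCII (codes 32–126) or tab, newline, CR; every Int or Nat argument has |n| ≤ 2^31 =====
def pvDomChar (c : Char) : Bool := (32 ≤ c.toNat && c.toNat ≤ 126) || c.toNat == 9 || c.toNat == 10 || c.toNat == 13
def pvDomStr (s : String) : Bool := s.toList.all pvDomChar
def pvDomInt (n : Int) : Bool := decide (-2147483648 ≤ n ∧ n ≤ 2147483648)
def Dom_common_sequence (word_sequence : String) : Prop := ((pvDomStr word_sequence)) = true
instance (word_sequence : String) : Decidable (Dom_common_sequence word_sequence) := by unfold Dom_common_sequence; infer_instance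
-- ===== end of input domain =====

-- B replaces A's quadratic scan (slice/reverse comparison per start index) by a single
-- KMP failure-function pass over reverse(s) + NUL + s, whose final border length is the
-- length of the longest palindromic suffix (linear time).

-- ===== PORT A =====
-- forward_sequence: ''.join(word.lower() for word in word_sequence.split(", "))
def pvForward (word_sequence : String) : String :=
  let words := (PySem.Str.split? word_sequence ", ").getD []   -- sep ", " ≠ "", so split? is `some`
  PySem.Str.join "" (words.map PySem.Str.lower)

-- backward_sequence: forward[::-1]  (step -1 ≠ 0, so slice? is `some`)
def pvBackward (word_sequence : String) : String :=
  (PySem.Str.slice? (pvForward word_sequence) none none (-1)).getD ""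

-- the `for i in range(len(forward))` loop of A, structural recursion over the range list
def pvLoopA (forward backward : String) : List Int → Option String
  | [] => none
  | i :: rest =>
    let test1 := PySem.Str.slice forward (some i) none
    let test2 := PySem.Str.slice backward none (some (PySem.Str.len forward - i))
    if test1 = test2 then some test1 else pvLoopA forward backward rest

def common_sequence (word_sequence : String) : Option String :=
  let forward := pvForward word_sequence
  let backward := pvBackward word_sequence
  pvLoopA forward backward (PySem.List.pyRange 0 (PySem.Str.len forward) 1)

-- ===== PORT B =====
-- s = "".join(w.lower() for w in word_sequence.split(", "))
def pvConcatB (word_sequence : String) : String :=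
  PySem.Str.join "" (((PySem.Str.split? word_sequence ", ").getD []).map PySem.Str.lower)

-- `while k and t[i] != t[k]: k = f[k-1]` — fuel bounds the descent (k strictly
-- decreases in every reachable state, so fuel = initial k is never exhausted)
def pvWhileB (t : List Char) (f : List Nat) (c : Char) : Nat → Nat → Nat
  | _, 0 => 0
  | 0, k + 1 => k + 1
  | fuel + 1, k + 1 =>
    if c = t.getD (k + 1) (Char.ofNat 0) then k + 1
    else pvWhileB t f c fuel (f.getD k 0)

-- `for i in range(1, len(t)): … ; f[i] = k` over state (f, k)
def pvKmpB (t : List Char) : List Nat → List Nat × Nat → List Nat × Nat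
  | [], st => st
  | i :: rest, (f, k) =>
    let k1 := pvWhileB t f (t.getD i (Char.ofNat 0)) k k
    let k2 := if t.getD i (Char.ofNat 0) = t.getD k1 (Char.ofNat 0) then k1 + 1 else k1
    pvKmpB t rest (f.set i k2, k2)

def common_sequence_alt (word_sequence : String) : Option String :=
  let s := pvConcatB word_sequence
  let l := s.toList
  if l = [] then none
  else
    let t := l.reverse ++ Char.ofNat 0 :: l          -- t = s[::-1] + "\x00" + s
    let st := pvKmpB t (List.range' 1 (t.length - 1)) (List.replicate t.length 0, 0)
    some (PySem.Str.slice s (some (PySem.Str.len s - (st.2 : Int))) none)   -- s[len(s)-k:]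

-- ===== PRECONDITION & SPEC =====
def Spec_common_sequence (word_sequence : String) (out : Option String) : Prop := out = common_sequence_alt word_sequence
instance (word_sequence : String) (out : Option String) : Decidable (Spec_common_sequence word_sequence out) := by unfold Spec_common_sequence; infer_instance

-- ===== CLAIM (what is proved, stated in full; the proofs are below) =====
def Claim_equal_common_sequence : Prop := ∀ (word_sequence : String), Dom_common_sequence word_sequence → Spec_common_sequence word_sequence (common_sequence word_sequence)

-- ===== LEMMAS AND PROOFS =====

-- "the prefix of length j of u is also a suffix of u"
def pvPb (u : List Char) (j : Nat) : Bool := u.take j == u.drop (u.length - j)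

-- greatest proper such j (the classical "failure"/border value)
def pvMaxB (u : List Char) : Nat := Nat.findGreatest (fun j => pvPb u j = true) (u.length - 1)

lemma pvPb_iff (u : List Char) (j : Nat) :
    pvPb u j = true ↔ u.take j = u.drop (u.length - j) := by
  simp [pvPb]

lemma pvPb_zero (u : List Char) : pvPb u 0 = true := by simp [pvPb]

lemma pvMaxB_le (u : List Char) : pvMaxB u ≤ u.length - 1 := Nat.findGreatest_le _

lemma pvPb_pvMaxB (u : List Char) : pvPb u (pvMaxB u) = true := by
  rw [pvMaxB]
  exact Nat.findGreatest_spec (P := fun j => pvPb u j = true) (Nat.zero_le _) (pvPb_zero u)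

lemma pv_le_maxB (u : List Char) (j : Nat) (hj : j ≤ u.length - 1)
    (h : pvPb u j = true) : j ≤ pvMaxB u := by
  rw [pvMaxB]
  exact Nat.le_findGreatest (P := fun j => pvPb u j = true) hj h

-- transfer: below a border k of u, borders of u and of u.take k coincide
lemma pvPb_take (u : List Char) (k j : Nat) (hk : k ≤ u.length)
    (hkb : pvPb u k = true) (hj : j ≤ k) : pvPb (u.take k) j = pvPb u j := by
  have hlen : (u.take k).length = k := by simp [hk]
  have hdk : u.take k = u.drop (u.length - k) := (pvPb_iff u k).1 hkb
  have hdrop : (u.take k).drop (k - j) = u.drop (u.length - j) := by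
    rw [hdk, List.drop_drop]
    congr 1
    omega
  rw [pvPb, pvPb, hlen, List.take_take, Nat.min_eq_left hj, hdrop]

-- extension: borders of u ++ [c] of positive length are extended borders of u
lemma pvPb_snoc (u : List Char) (c : Char) (j : Nat) (hj : j < u.length) :
    pvPb (u ++ [c]) (j + 1) = true ↔ (pvPb u j = true ∧ u[j] = c) := by
  have h1 : (u ++ [c]).take (j + 1) = u.take j ++ [u[j]] := by
    rw [List.take_append_of_le_length (by omega), List.take_add_one]
    simp [List.getElem?_eq_getElem hj]
  have h2 : (u ++ [c]).drop ((u ++ [c]).length - (j + 1)) = u.drop (u.length - j) ++ [c] := by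
    simp only [List.length_append, List.length_singleton]
    rw [show u.length + 1 - (j + 1) = u.length - j by omega,
      List.drop_append_of_le_length (by omega)]
  rw [pvPb_iff, h1, h2, ← List.concat_eq_append, ← List.concat_eq_append, List.concat_inj,
    pvPb_iff]

-- the while loop descends the border chain: it returns the largest border j of
-- u = t.take i with t[j] = t[i] (or 0 if there is none)
lemma pv_while_spec (t : List Char) (f : List Nat) (i : Nat) (hi : i ≤ t.length)
    (Hf : ∀ j, j < i → f.getD j 0 = pvMaxB (t.take (j + 1))) :
    ∀ k fuel, k ≤ fuel → k < i → pvPb (t.take i) k = true →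
      pvWhileB t f (t.getD i (Char.ofNat 0)) fuel k ≤ k ∧
      pvPb (t.take i) (pvWhileB t f (t.getD i (Char.ofNat 0)) fuel k) = true ∧
      (pvWhileB t f (t.getD i (Char.ofNat 0)) fuel k = 0 ∨
        t.getD i (Char.ofNat 0) =
          t.getD (pvWhileB t f (t.getD i (Char.ofNat 0)) fuel k) (Char.ofNat 0)) ∧
      (∀ j, j ≤ k → pvPb (t.take i) j = true →
        t.getD j (Char.ofNat 0) = t.getD i (Char.ofNat 0) →
        j ≤ pvWhileB t f (t.getD i (Char.ofNat 0)) fuel k) := by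
  intro k
  induction k using Nat.strong_induction_on with
  | _ k IH =>
    intro fuel hfu hk hPk
    match k, fuel with
    | 0, fuel =>
      have h0 : pvWhileB t f (t.getD i (Char.ofNat 0)) fuel 0 = 0 := by
        cases fuel <;> rfl
      rw [h0]
      exact ⟨le_refl _, pvPb_zero _, Or.inl rfl, fun j hj _ _ => hj⟩
    | (kk + 1), 0 => omega
    | (kk + 1), (fl + 1) =>
      have hredif : pvWhileB t f (t.getD i (Char.ofNat 0)) (fl + 1) (kk + 1)
          = if t.getD i (Char.ofNat 0) = t.getD (kk + 1) (Char.ofNat 0) then kk + 1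
            else pvWhileB t f (t.getD i (Char.ofNat 0)) fl (f.getD kk 0) := by
        rw [pvWhileB]
      by_cases hc : t.getD i (Char.ofNat 0) = t.getD (kk + 1) (Char.ofNat 0)
      · rw [hredif, if_pos hc]
        exact ⟨le_refl _, hPk, Or.inr hc, fun j hj _ _ => hj⟩
      · have hred : pvWhileB t f (t.getD i (Char.ofNat 0)) (fl + 1) (kk + 1)
            = pvWhileB t f (t.getD i (Char.ofNat 0)) fl (f.getD kk 0) := by
          rw [hredif, if_neg hc]
        have hkk : kk < i := by omega
        have hfkk : f.getD kk 0 = pvMaxB (t.take (kk + 1)) := Hf kk hkk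
        have hlen' : (t.take (kk + 1)).length = kk + 1 := by
          simp; omega
        have hnext_le : f.getD kk 0 ≤ kk := by
          rw [hfkk]
          have := pvMaxB_le (t.take (kk + 1))
          omega
        have htt : (t.take i).take (kk + 1) = t.take (kk + 1) := by
          rw [List.take_take, Nat.min_eq_left (by omega)]
        have hilen : (t.take i).length = i := by simp; omega
        have hPnext : pvPb (t.take i) (f.getD kk 0) = true := by
          have h1 : pvPb (t.take (kk + 1)) (f.getD kk 0) = true := by
            rw [hfkk]; exact pvPb_pvMaxB _
          rw [← htt] at h1
          rwa [pvPb_take (t.take i) (kk + 1) (f.getD kk 0) (by omega) hPk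
            (by omega)] at h1
        obtain ⟨ha, hb, hcOr, hd⟩ := IH (f.getD kk 0) (by omega) fl (by omega) (by omega) hPnext
        rw [hred]
        refine ⟨by omega, hb, hcOr, ?_⟩
        intro j hj hPj hcj
        have hjne : j ≠ kk + 1 := by
          intro h; apply hc; rw [← hcj, h]
        have hj' : j ≤ kk := by omega
        have hPj' : pvPb (t.take (kk + 1)) j = true := by
          rw [← htt, pvPb_take (t.take i) (kk + 1) j (by omega) hPk (by omega)]
          exact hPj
        have hjnext : j ≤ f.getD kk 0 := by
          rw [hfkk]
          exact pv_le_maxB _ _ (by omega) hPj'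
        exact hd j hjnext hPj hcj

-- one iteration of the for loop computes the next failure value
lemma pv_step (t : List Char) (f : List Nat) (i : Nat) (h1 : 1 ≤ i) (hi : i < t.length)
    (Hf : ∀ j, j < i → f.getD j 0 = pvMaxB (t.take (j + 1))) :
    (if t.getD i (Char.ofNat 0)
        = t.getD (pvWhileB t f (t.getD i (Char.ofNat 0)) (pvMaxB (t.take i)) (pvMaxB (t.take i))) (Char.ofNat 0)
      then pvWhileB t f (t.getD i (Char.ofNat 0)) (pvMaxB (t.take i)) (pvMaxB (t.take i)) + 1
      else pvWhileB t f (t.getD i (Char.ofNat 0)) (pvMaxB (t.take i)) (pvMaxB (t.take i)))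
      = pvMaxB (t.take (i + 1)) := by
  have hilen : (t.take i).length = i := by simp; omega
  have hk_lt : pvMaxB (t.take i) < i := by
    have := pvMaxB_le (t.take i); omega
  obtain ⟨ha, hb, hcOr, hd⟩ := pv_while_spec t f i (le_of_lt hi) Hf (pvMaxB (t.take i))
    (pvMaxB (t.take i)) le_rfl hk_lt (pvPb_pvMaxB _)
  set k1 := pvWhileB t f (t.getD i (Char.ofNat 0)) (pvMaxB (t.take i)) (pvMaxB (t.take i)) with hk1
  have hk1_lt : k1 < i := by omega
  have hv : t.take (i + 1) = t.take i ++ [t[i]] := by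
    rw [List.take_add_one, List.getElem?_eq_getElem hi]
    rfl
  have hvlen : (t.take (i + 1)).length = i + 1 := by simp; omega
  have hgetD : ∀ j (hj : j < i), t.getD j (Char.ofNat 0) = t[j]'(by omega) := by
    intro j hj
    rw [List.getD_eq_getElem?_getD, List.getElem?_eq_getElem (by omega : j < t.length)]
    rfl
  have hgi : t.getD i (Char.ofNat 0) = t[i] := by
    rw [List.getD_eq_getElem?_getD, List.getElem?_eq_getElem hi]
    rfl
  -- any positive border m+1 of t.take (i+1) gives m ≤ k1
  have hupper : ∀ m, m < i → pvPb (t.take i) m = true →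
      t.getD m (Char.ofNat 0) = t.getD i (Char.ofNat 0) → m ≤ k1 := by
    intro m hm hPm hgm
    exact hd m (pv_le_maxB _ _ (by omega) hPm) hPm hgm
  by_cases hcc : t.getD i (Char.ofNat 0) = t.getD k1 (Char.ofNat 0)
  · rw [if_pos hcc]
    apply le_antisymm
    · -- k1 + 1 ≤ pvMaxB (t.take (i+1))
      apply pv_le_maxB _ _ (by omega)
      rw [hv, pvPb_snoc _ _ k1 (by omega)]
      refine ⟨hb, ?_⟩
      have hg1 : (t.take i)[k1]'(by omega) = t[k1]'(by omega) := List.getElem_take ..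
      rw [hg1, ← hgetD k1 hk1_lt, ← hcc, hgi]
    · -- pvMaxB (t.take (i+1)) ≤ k1 + 1
      rcases Nat.eq_zero_or_pos (pvMaxB (t.take (i + 1))) with h0 | hpos
      · omega
      · obtain ⟨m, hm⟩ : ∃ m, pvMaxB (t.take (i + 1)) = m + 1 :=
          ⟨pvMaxB (t.take (i + 1)) - 1, by omega⟩
        have hPM := pvPb_pvMaxB (t.take (i + 1))
        rw [hm] at hPM
        have hmb : m + 1 ≤ i := by
          have := pvMaxB_le (t.take (i + 1)); omega
        rw [hv, pvPb_snoc _ _ m (by omega)] at hPM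
        have hgm : t.getD m (Char.ofNat 0) = t.getD i (Char.ofNat 0) := by
          rw [hgetD m (by omega), hgi]
          have hg1 : (t.take i)[m]'(by omega) = t[m]'(by omega) := List.getElem_take ..
          rw [← hg1]
          exact hPM.2
        have := hupper m (by omega) hPM.1 hgm
        omega
  · rw [if_neg hcc]
    have hk10 : k1 = 0 := by
      rcases hcOr with h | h
      · exact h
      · exact absurd h hcc
    rw [hk10]
    by_contra hne
    obtain ⟨m, hm⟩ : ∃ m, pvMaxB (t.take (i + 1)) = m + 1 :=
      ⟨pvMaxB (t.take (i + 1)) - 1, by omega⟩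
    have hPM := pvPb_pvMaxB (t.take (i + 1))
    rw [hm] at hPM
    have hmb : m + 1 ≤ i := by
      have := pvMaxB_le (t.take (i + 1)); omega
    rw [hv, pvPb_snoc _ _ m (by omega)] at hPM
    have hgm : t.getD m (Char.ofNat 0) = t.getD i (Char.ofNat 0) := by
      rw [hgetD m (by omega), hgi]
      have hg1 : (t.take i)[m]'(by omega) = t[m]'(by omega) := List.getElem_take ..
      rw [← hg1]
      exact hPM.2
    have hm0 : m ≤ k1 := hupper m (by omega) hPM.1 hgm
    have hm00 : m = 0 := by omega
    subst hm00
    apply hcc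
    rw [hk10]
    exact hgm.symm

-- the whole for loop maintains the failure-function invariant
lemma pv_kmp (t : List Char) : ∀ (m i : Nat) (f : List Nat) (k : Nat),
    i + m = t.length → 1 ≤ i → f.length = t.length →
    (∀ j, j < i → f.getD j 0 = pvMaxB (t.take (j + 1))) →
    k = pvMaxB (t.take i) →
    (pvKmpB t (List.range' i m) (f, k)).2 = pvMaxB t := by
  intro m
  induction m with
  | zero =>
    intro i f k him h1 hfl Hf hk
    have hit : i = t.length := by omega
    subst hit
    rw [List.take_length] at hk
    simpa [pvKmpB] using hk
  | succ m ih =>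
    intro i f k him h1 hfl Hf hk
    rw [List.range'_succ]
    have hi : i < t.length := by omega
    have hstep := pv_step t f i h1 hi Hf
    have hred : pvKmpB t (i :: List.range' (i + 1) m) (f, k)
        = pvKmpB t (List.range' (i + 1) m)
            (f.set i (pvMaxB (t.take (i + 1))), pvMaxB (t.take (i + 1))) := by
      simp only [pvKmpB]
      rw [hk, hstep]
    rw [hred]
    have Hf' : ∀ j, j < i + 1 →
        (f.set i (pvMaxB (t.take (i + 1)))).getD j 0 = pvMaxB (t.take (j + 1)) := by
      intro j hj
      rcases Nat.lt_or_ge j i with hji | hji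
      · rw [List.getD_eq_getElem?_getD, List.getElem?_set, if_neg (by omega),
          ← List.getD_eq_getElem?_getD]
        exact Hf j hji
      · have hji' : j = i := by omega
        subst hji'
        rw [List.getD_eq_getElem?_getD, List.getElem?_set, if_pos rfl,
          if_pos (by omega)]
        rfl
    exact ih (i + 1) _ _ (by omega) (by omega) (by simp [hfl]) Hf' rfl

-- ——— structure of t = reverse l ++ NUL ++ l ———

-- borders of t of length j ≤ n are exactly the palindromic suffixes of l of length j
lemma pvPb_t_iff (l : List Char) (j : Nat) (hj : j ≤ l.length) :
    pvPb (l.reverse ++ Char.ofNat 0 :: l) j = true ↔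
      (l.drop (l.length - j)).reverse = l.drop (l.length - j) := by
  have h1 : (l.reverse ++ Char.ofNat 0 :: l).take j = (l.drop (l.length - j)).reverse := by
    rw [List.take_append_of_le_length (by simp; omega), List.take_reverse]
  have h2 : (l.reverse ++ Char.ofNat 0 :: l).drop
      ((l.reverse ++ Char.ofNat 0 :: l).length - j) = l.drop (l.length - j) := by
    have hsh : l.reverse ++ Char.ofNat 0 :: l = (l.reverse ++ [Char.ofNat 0]) ++ l := by
      simp
    rw [hsh, List.drop_append, List.drop_eq_nil_of_le (by simp; omega), List.nil_append]
    congr 1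
    simp
    omega
  rw [pvPb, h1, h2, beq_iff_eq]

-- no border of t can be longer than n: it would have to put NUL inside l
lemma pvPb_t_le (l : List Char) (hNul : Char.ofNat 0 ∉ l) (j : Nat)
    (hj2 : j ≤ 2 * l.length)
    (hP : pvPb (l.reverse ++ Char.ofNat 0 :: l) j = true) : j ≤ l.length := by
  by_contra hgt
  have htlen : (l.reverse ++ Char.ofNat 0 :: l).length = 2 * l.length + 1 := by
    simp; omega
  have heq : (l.reverse ++ Char.ofNat 0 :: l).take j
      = (l.reverse ++ Char.ofNat 0 :: l).drop ((l.reverse ++ Char.ofNat 0 :: l).length - j) :=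
    (pvPb_iff _ j).1 hP
  have hlhs : ((l.reverse ++ Char.ofNat 0 :: l).take j)[l.length]? = some (Char.ofNat 0) := by
    rw [List.getElem?_take, if_pos (by omega),
      List.getElem?_append_right (by simp)]
    simp
  have hlt : 2 * l.length - j < l.length := by omega
  have hrhs : ((l.reverse ++ Char.ofNat 0 :: l).drop
      ((l.reverse ++ Char.ofNat 0 :: l).length - j))[l.length]? = l[2 * l.length - j]? := by
    rw [List.getElem?_drop, htlen,
      List.getElem?_append_right (by simp)]
    have hidx : 2 * l.length + 1 - j + l.length - l.reverse.length = (2 * l.length - j) + 1 := by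
      simp; omega
    rw [hidx]
    rfl
  rw [heq, hrhs, List.getElem?_eq_getElem hlt] at hlhs
  exact hNul ((Option.some_inj.mp hlhs) ▸ List.getElem_mem hlt)

-- a suffix of length 1 is a palindrome
lemma pv_pal_one (l : List Char) (h : 1 ≤ l.length) :
    (l.drop (l.length - 1)).reverse = l.drop (l.length - 1) := by
  have hlen : (l.drop (l.length - 1)).length = 1 := by simp; omega
  obtain ⟨a, ha⟩ := List.length_eq_one_iff.mp hlen
  rw [ha]
  rfl

-- ——— the A side ———

-- A's comparison at start index k says: the suffix from k is a palindrome
lemma pv_condA_iff (fs : String) (k : Nat) (hk : k < fs.toList.length) :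
    (PySem.Str.slice fs (some (k : Int)) none =
      PySem.Str.slice (String.ofList fs.toList.reverse) none
        (some (PySem.Str.len fs - (k : Int)))) ↔
      ((fs.toList.drop k).reverse = fs.toList.drop k) := by
  set l := fs.toList with hl
  have hNk : PySem.Str.len fs - (k : Int) = ((l.length - k : Nat) : Int) := by
    rw [PySem.Str.len_eq, ← hl]
    omega
  rw [← String.toList_inj]
  simp only [PySem.Str.toList_slice, PySem.Chars.slice_eq_listSlice, String.toList_ofList, ← hl]
  rw [PySem.List.slice_from_natCast, hNk, PySem.List.slice_to_natCast, List.take_reverse,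
    show l.length - (l.length - k) = k by omega]
  constructor
  · intro h; exact h.symm
  · intro h; exact h.symm

-- A's loop returns at the FIRST palindromic start index
lemma pv_loopA_ret (fs : String) (i0 : Nat) (hi0 : i0 < fs.toList.length)
    (hpal : (fs.toList.drop i0).reverse = fs.toList.drop i0)
    (hmin : ∀ a : Nat, a < i0 → ¬ ((fs.toList.drop a).reverse = fs.toList.drop a)) :
    ∀ (m a : Nat), a + m = i0 →
      pvLoopA fs (String.ofList fs.toList.reverse)
          (PySem.List.pyRange (a : Int) (fs.toList.length : Int) 1)
        = some (PySem.Str.slice fs (some (i0 : Int)) none) := by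
  intro m
  induction m with
  | zero =>
    intro a ham
    have ha : a = i0 := by omega
    subst ha
    rw [PySem.List.pyRange_one_cons (by exact_mod_cast hi0)]
    show (if _ then _ else _) = _
    rw [if_pos ((pv_condA_iff fs a hi0).2 hpal)]
  | succ m ih =>
    intro a ham
    have ha : a < i0 := by omega
    have han : a < fs.toList.length := by omega
    rw [PySem.List.pyRange_one_cons (by exact_mod_cast han)]
    show (if _ then _ else _) = _
    rw [if_neg (fun h => hmin a ha ((pv_condA_iff fs a han).1 h))]
    rw [show ((a : Int) + 1) = (((a + 1 : Nat)) : Int) by push_cast; ring]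
    exact ih (a + 1) (by omega)

-- ——— Dom: the concatenated lowered string contains no NUL ———

lemma pv_go_chars (sep : List Char) :
    ∀ (fuel : Nat) (l cur : List Char) (acc : List (List Char)) (p : List Char),
      p ∈ PySem.Chars.splitOn.go sep fuel l cur acc → ∀ c ∈ p,
        c ∈ l ∨ c ∈ cur ∨ ∃ q ∈ acc, c ∈ q := by
  intro fuel
  induction fuel with
  | zero =>
    intro l cur acc p hp c hc
    rw [PySem.Chars.splitOn.go] at hp
    simp only [List.mem_reverse, List.mem_cons] at hp
    rcases hp with h | h
    · subst h
      rcases List.mem_append.mp hc with h | h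
      · exact Or.inr (Or.inl (List.mem_reverse.mp h))
      · exact Or.inl h
    · exact Or.inr (Or.inr ⟨p, h, hc⟩)
  | succ fuel ih =>
    intro l cur acc p hp c hc
    cases l with
    | nil =>
      rw [PySem.Chars.splitOn.go] at hp
      · simp only [List.mem_reverse, List.mem_cons] at hp
        rcases hp with h | h
        · subst h
          exact Or.inr (Or.inl (List.mem_reverse.mp hc))
        · exact Or.inr (Or.inr ⟨p, h, hc⟩)
      · omega
    | cons x rest =>
      rw [PySem.Chars.splitOn.go] at hp
      by_cases hpre : sep.isPrefixOf (x :: rest) = true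
      · rw [if_pos hpre] at hp
        rcases ih _ _ _ _ hp c hc with h | h | ⟨q, hq, hcq⟩
        · exact Or.inl (List.mem_of_mem_drop h)
        · exact absurd h (List.not_mem_nil)
        · rcases List.mem_cons.mp hq with h | h
          · subst h
            exact Or.inr (Or.inl (List.mem_reverse.mp hcq))
          · exact Or.inr (Or.inr ⟨q, h, hcq⟩)
      · rw [if_neg hpre] at hp
        rcases ih _ _ _ _ hp c hc with h | h | ⟨q, hq, hcq⟩
        · exact Or.inl (List.mem_cons_of_mem _ h)
        · rcases List.mem_cons.mp h with h | h
          · exact Or.inl (h ▸ List.mem_cons_self)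
          · exact Or.inr (Or.inl h)
        · exact Or.inr (Or.inr ⟨q, hq, hcq⟩)

lemma pv_splitOn_chars (s sep : List Char) (p : List Char)
    (hp : p ∈ PySem.Chars.splitOn s sep) (c : Char) (hc : c ∈ p) : c ∈ s := by
  rw [PySem.Chars.splitOn] at hp
  rcases pv_go_chars sep _ s [] [] p hp c hc with h | h | ⟨q, hq, _⟩
  · exact h
  · exact absurd h (List.not_mem_nil)
  · exact absurd hq (List.not_mem_nil)

lemma pv_mem_join_nil (ps : List (List Char)) (c : Char)
    (hc : c ∈ PySem.Chars.join [] ps) : ∃ p ∈ ps, c ∈ p := by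
  induction ps with
  | nil => simp [PySem.Chars.join, List.intercalate] at hc
  | cons p ps ih =>
    cases ps with
    | nil =>
      simp [PySem.Chars.join, List.intercalate] at hc
      exact ⟨p, List.mem_cons_self, hc⟩
    | cons q qs =>
      rw [PySem.Chars.join, List.intercalate] at hc
      simp only [List.intersperse_cons₂, List.flatten_cons,
        List.mem_append] at hc
      rcases hc with h | h
      · exact ⟨p, List.mem_cons_self, h⟩
      · obtain ⟨r, hr, hcr⟩ := ih (by
          rw [PySem.Chars.join, List.intercalate]
          simpa using h)
        exact ⟨r, List.mem_cons_of_mem _ hr, hcr⟩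

lemma pv_lowerChar_ne (c : Char) (h : pvDomChar c = true) :
    PySem.Chars.lowerChar c ≠ Char.ofNat 0 := by
  rw [PySem.Chars.lowerChar]
  split_ifs with hu
  · intro heq
    have hz : ('A' ≤ c ∧ c ≤ 'Z') := by
      rw [PySem.Chars.isupper] at hu
      simpa using hu
    have hle : c.toNat ≤ 90 := by
      have := hz.2
      rw [Char.le_def] at this
      exact_mod_cast this
    have h1 : (Char.ofNat (c.toNat + 32)).toNat = c.toNat + 32 := by
      rw [Char.toNat_ofNat, if_pos]
      exact Or.inl (by omega)
    rw [heq] at h1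
    have h0 : (Char.ofNat 0).toNat = 0 := by decide
    omega
  · intro heq
    rw [heq] at h
    exact absurd h (by decide)

lemma pv_concat_noNul (ws : String) (hdom : pvDomStr ws = true) :
    Char.ofNat 0 ∉ (pvConcatB ws).toList := by
  intro hmem
  rw [pvConcatB, PySem.Str.toList_join] at hmem
  have hsplit := PySem.Str.split?_map ws ", "
  rw [PySem.Chars.split?] at hsplit
  rw [if_neg (by decide)] at hsplit
  obtain ⟨ps, hps, hmap⟩ := Option.map_eq_some_iff.mp hsplit
  rw [hps] at hmem
  simp only [Option.getD_some] at hmem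
  obtain ⟨p, hp, hcp⟩ := pv_mem_join_nil _ _ (by simpa using hmem)
  simp only [List.mem_map] at hp
  obtain ⟨q, hq, hqp⟩ := hp
  have hplist : p = PySem.Chars.lower q.toList := by
    rw [← hqp]
    simp [Function.comp, PySem.Str.toList_lower]
  rw [hplist, PySem.Chars.lower, List.mem_map] at hcp
  obtain ⟨c0, hc0, hc0l⟩ := hcp
  have hc0s : c0 ∈ ws.toList := by
    apply pv_splitOn_chars ws.toList (", ".toList) q.toList _ c0 hc0
    have : q.toList ∈ ps.map String.toList := List.mem_map_of_mem hq
    rw [hmap] at this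
    exact this
  have hdc : pvDomChar c0 = true := by
    rw [pvDomStr, List.all_eq_true] at hdom
    exact hdom c0 hc0s
  exact pv_lowerChar_ne c0 hdc hc0l

-- ===== VERDICT (by name: the statement is the Claim_ definition above) =====
theorem common_sequence_spec : Claim_equal_common_sequence := by
  intro ws hdom
  unfold Spec_common_sequence
  show pvLoopA (pvForward ws) (pvBackward ws)
      (PySem.List.pyRange 0 (PySem.Str.len (pvForward ws)) 1)
    = common_sequence_alt ws
  have hfb : pvForward ws = pvConcatB ws := rfl
  have hbw : pvBackward ws = String.ofList (pvConcatB ws).toList.reverse := by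
    rw [pvBackward, PySem.Str.slice?_none_none_neg_one]
    rfl
  rw [hfb, hbw]
  set s := pvConcatB ws with hs
  set l := s.toList with hl
  by_cases hnil : l = []
  · have hlen0 : PySem.Str.len s = 0 := by
      rw [PySem.Str.len_eq, ← hl, hnil]
      rfl
    rw [common_sequence_alt]
    show pvLoopA s (String.ofList l.reverse) (PySem.List.pyRange 0 (PySem.Str.len s) 1)
      = if (pvConcatB ws).toList = [] then none else _
    rw [hlen0, PySem.List.pyRange_one_eq_nil (le_refl 0), if_pos (by rw [← hl]; exact hnil)]
    rfl
  · have hn1 : 1 ≤ l.length := by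
      cases hll : l with
      | nil => exact absurd hll hnil
      | cons a as => simp
    set t := l.reverse ++ Char.ofNat 0 :: l with ht
    have htlen : t.length = 2 * l.length + 1 := by
      rw [ht]; simp; omega
    have hNul : Char.ofNat 0 ∉ l := by
      rw [hl, hs]
      exact pv_concat_noNul ws hdom
    -- the KMP pass computes the longest border of t
    have hK2 : (pvKmpB t (List.range' 1 (t.length - 1)) (List.replicate t.length 0, 0)).2
        = pvMaxB t := by
      apply pv_kmp t (t.length - 1) 1 _ 0 (by omega) (le_refl 1) (by simp)
      · intro j hj
        have hj0 : j = 0 := by omega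
        subst hj0
        rw [List.getD_eq_getElem?_getD, List.getElem?_replicate, if_pos (by omega)]
        rw [pvMaxB]
        have h1 : (t.take 1).length = 1 := by simp; omega
        rw [h1]
        rfl
      · rw [pvMaxB]
        have h1 : (t.take 1).length = 1 := by simp; omega
        rw [h1]
        rfl
    have hKle : pvMaxB t ≤ 2 * l.length := by
      have := pvMaxB_le t
      omega
    have hPK : pvPb t (pvMaxB t) = true := pvPb_pvMaxB t
    have hKn : pvMaxB t ≤ l.length := pvPb_t_le l hNul (pvMaxB t) hKle (ht ▸ hPK)
    have hpal : (l.drop (l.length - pvMaxB t)).reverse = l.drop (l.length - pvMaxB t) :=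
      (pvPb_t_iff l (pvMaxB t) hKn).1 (ht ▸ hPK)
    have hK1 : 1 ≤ pvMaxB t := by
      apply pv_le_maxB t 1 (by omega)
      rw [ht]
      exact (pvPb_t_iff l 1 hn1).2 (pv_pal_one l hn1)
    have hmin : ∀ a : Nat, a < l.length - pvMaxB t →
        ¬ ((l.drop a).reverse = l.drop a) := by
      intro a ha hpa
      have h1 : pvPb t (l.length - a) = true := by
        rw [ht]
        apply (pvPb_t_iff l (l.length - a) (by omega)).2
        rw [show l.length - (l.length - a) = a by omega]
        exact hpa
      have h2 : l.length - a ≤ pvMaxB t := pv_le_maxB t (l.length - a) (by omega) h1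
      omega
    have hA := pv_loopA_ret s (l.length - pvMaxB t) (by rw [← hl]; omega) hpal hmin
      (l.length - pvMaxB t) 0 (by omega)
    rw [common_sequence_alt]
    show pvLoopA s (String.ofList l.reverse) (PySem.List.pyRange 0 (PySem.Str.len s) 1)
      = if (pvConcatB ws).toList = [] then none
        else some (PySem.Str.slice s
          (some (PySem.Str.len s -
            ((pvKmpB t (List.range' 1 (t.length - 1)) (List.replicate t.length 0, 0)).2 : Int)))
          none)
    rw [if_neg (by rw [← hl]; exact hnil), hK2]
    have hsl : PySem.Str.len s - ((pvMaxB t : Nat) : Int)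
        = ((l.length - pvMaxB t : Nat) : Int) := by
      rw [PySem.Str.len_eq, ← hl]
      omega
    rw [hsl]
    have hlen_eq : PySem.Str.len s = ((l.length : Nat) : Int) := by
      rw [PySem.Str.len_eq, ← hl]
    rw [hlen_eq]
    rw [show (0 : Int) = ((0 : Nat) : Int) by norm_num]
    rw [← hl] at hA
    exact hA
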